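-- pv_equiv track=rewrite | github.com/jaizu23/Programacion-2o-cuatri | Python/1era entrega/ejerciciosPEC1/Soluciones/ejercicio_2.py | asignar_esquis
-- ===== SOURCE A (Python) =====
-- def asignar_esquis(alturas :list, longitudes: list) -> list:
--     """ Asigna unos esquís de longitud x a una esquiadora de altura y de manera que su diferencia sea mínima """
--
--     assert len(alturas) == len(longitudes), "Deben tener la misma longitud"
--
--     solucion = [] # Tuplas (altura, longitud)
--
--     # Ordenamos de menor a mayor las dos listas
--     alturas = sorted(alturas)
--     longitudes = sorted(longitudes)
--
--     while len(alturas) > 0: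
--         # Escogemos los candidatos en orden
--         pareja = (alturas[0], longitudes[0])
--         # Eliminamos candidatos
--         alturas = alturas[1:]
--         longitudes = longitudes[1:]
--         # Añadimos a la solución
--         solucion += [pareja]
--
--     return solucion
-- ===== SOURCE B (Python) =====
-- def asignar_esquis(alturas: list, longitudes: list) -> list:
--     """Pair sorted heights with sorted ski lengths in order, via a single zip."""
--     assert len(alturas) == len(longitudes), "Deben tener la misma longitud"
--     return list(zip(sorted(alturas), sorted(longitudes)))
-- ===== Notes on version B (the rewrite author's own statement) =====
-- stated objective: faster
-- what changed: B zips the two sorted lists directly instead of A's loop that rebuilds both lists by slicing off the head at every step; like A it asserts equal lengths.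
import Mathlib
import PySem

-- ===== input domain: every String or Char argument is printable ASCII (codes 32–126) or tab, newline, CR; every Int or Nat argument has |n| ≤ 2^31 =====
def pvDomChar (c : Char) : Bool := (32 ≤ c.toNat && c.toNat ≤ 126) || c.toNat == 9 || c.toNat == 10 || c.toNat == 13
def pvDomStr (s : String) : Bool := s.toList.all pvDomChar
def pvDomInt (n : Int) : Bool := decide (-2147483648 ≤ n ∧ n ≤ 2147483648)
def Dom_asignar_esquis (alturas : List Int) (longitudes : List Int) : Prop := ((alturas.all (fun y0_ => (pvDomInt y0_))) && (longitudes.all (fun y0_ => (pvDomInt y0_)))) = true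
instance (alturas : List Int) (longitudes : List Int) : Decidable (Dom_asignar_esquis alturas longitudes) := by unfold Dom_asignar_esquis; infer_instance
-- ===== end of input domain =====

-- B pairs the two sorted lists with a single zip instead of A's loop that re-slices both lists each step; equivalence of return values on equal-length inputs.


-- ===== PORT A =====
-- the while-loop: pops the head of each list, appends the pair to solucion
def asignar_esquis_loop : List Int → List Int → List (Int × Int) → List (Int × Int)
  | [], _, solucion => solucion
  | _ :: _, [], solucion => solucion   -- Python raises IndexError here; unreachable under Pre_
  | a :: as, l :: ls, solucion => asignar_esquis_loop as ls (solucion ++ [(a, l)])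

def asignar_esquis (alturas : List Int) (longitudes : List Int) : List (Int × Int) :=
  asignar_esquis_loop (PySem.List.sorted alturas (fun x => x) false)
                      (PySem.List.sorted longitudes (fun x => x) false) []

-- ===== PORT B =====
def asignar_esquis_alt (alturas : List Int) (longitudes : List Int) : List (Int × Int) :=
  (PySem.List.sorted alturas (fun x => x) false).zip (PySem.List.sorted longitudes (fun x => x) false)

-- ===== PRECONDITION & SPEC =====
-- Both A and B assert equal lengths (AssertionError otherwise); Pre_ excludes exactly those raising inputs.
def Pre_asignar_esquis (alturas : List Int) (longitudes : List Int) : Prop :=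
  alturas.length = longitudes.length
instance (alturas : List Int) (longitudes : List Int) : Decidable (Pre_asignar_esquis alturas longitudes) := by unfold Pre_asignar_esquis; infer_instance
def pvWitness_asignar_esquis : List Int × List Int := ([170, 150, 160], [165, 145, 155])

def Spec_asignar_esquis (alturas : List Int) (longitudes : List Int) (out : List (Int × Int)) : Prop := out = asignar_esquis_alt alturas longitudes
instance (alturas : List Int) (longitudes : List Int) (out : List (Int × Int)) : Decidable (Spec_asignar_esquis alturas longitudes out) := by unfold Spec_asignar_esquis; infer_instance

-- ===== CLAIM =====
def Claim_equal_asignar_esquis : Prop := ∀ (alturas : List Int) (longitudes : List Int), Dom_asignar_esquis alturas longitudes → Pre_asignar_esquis alturas longitudes → Spec_asignar_esquis alturas longitudes (asignar_esquis alturas longitudes)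

-- ===== LEMMAS AND PROOFS =====
theorem asignar_esquis_loop_eq (as ls : List Int) (sol : List (Int × Int)) :
    asignar_esquis_loop as ls sol = sol ++ as.zip ls := by
  induction as generalizing ls sol with
  | nil => simp [asignar_esquis_loop]
  | cons a as ih =>
    cases ls with
    | nil => simp [asignar_esquis_loop]
    | cons l ls => simp [asignar_esquis_loop, ih, List.zip]

-- ===== VERDICT =====
theorem asignar_esquis_spec : Claim_equal_asignar_esquis := by
  intro alturas longitudes _ _
  unfold Spec_asignar_esquis asignar_esquis asignar_esquis_alt
  simp [asignar_esquis_loop_eq]
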